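-- pv_equiv track=rewrite | github.com/kai-st/term-project-strands-of-time | strands_of_time/location/move.py | get_max_board_coordinates
-- ===== SOURCE A (Python) =====
-- def get_max_board_coordinates(board: dict) -> tuple[int, int]:
--     """
--     Return the largest coordinates for the board as a tuple of (X, Y) coordinates.
--
--     :param board: a well-formed board dictionary
--     :precondition: board must be a dictionary with (X, Y) coordinate keys
--     :postcondition: returns the largest coordinates for board as a tuple of (X, Y) coordinates
--     :return: a tuple with the largest coordinates as (X, Y) coordinates
--     :raises TypeError: if board is not a dictionary
--     :raises KeyError: if board does not have tuple keys containing pairs of integers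
--     :raises KeyError: if board tuple keys do not contain pairs of integers
--
--     >>> board_5_by_5, _ = create_game_board(5, 5, [2, 4])
--     >>> get_max_board_coordinates(board_5_by_5)
--     (4, 4)
--     >>> board_not_square, _ = create_game_board(6, 3, [2, 4])
--     >>> get_max_board_coordinates(board_not_square)
--     (5, 2)
--     >>> smallest_board, _ = create_game_board(3, 2, [1, 2])
--     >>> get_max_board_coordinates(smallest_board)
--     (2, 1)
--     """
--     if not isinstance(board, dict):
--         raise TypeError("board must be a dictionary")
--
--     tuple_keys = []
--     for key in board:
--         if isinstance(key, tuple):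
--             tuple_keys.append(key)
--             if len(key) != 2 or not isinstance(key[0], int) or not isinstance(key[1], int):
--                 raise KeyError('board locations must have "description" keys')
--     if len(tuple_keys) < 1:
--         raise KeyError("board must have tuple keys")
--
--     max_x_coordinate = max(key[0] for key in board.keys() if isinstance(key, tuple))
--     max_y_coordinate = max(key[1] for key in board.keys() if isinstance(key, tuple))
--
--     return max_x_coordinate, max_y_coordinate
-- ===== SOURCE B (Python) =====
-- def get_max_board_coordinates(board: dict) -> tuple[int, int]:
--     if not isinstance(board, dict):
--         raise TypeError("board must be a dictionary")
--
--     max_x_coordinate = None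
--     max_y_coordinate = None
--     for key in board:
--         if isinstance(key, tuple):
--             if len(key) != 2 or not isinstance(key[0], int) or not isinstance(key[1], int):
--                 raise KeyError('board locations must have "description" keys')
--             if max_x_coordinate is None:
--                 max_x_coordinate, max_y_coordinate = key
--             else:
--                 if key[0] > max_x_coordinate:
--                     max_x_coordinate = key[0]
--                 if key[1] > max_y_coordinate:
--                     max_y_coordinate = key[1]
--     if max_x_coordinate is None:
--         raise KeyError("board must have tuple keys")
--
--     return max_x_coordinate, max_y_coordinate
-- ===== Notes on version B (the rewrite author's own statement) =====
-- stated objective: simpler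
-- what changed: Replaced A's validation loop plus two separate max-generator passes over the keys by one single pass that validates each key and maintains running max_x/max_y, with the same exceptions in the same order.
import Mathlib
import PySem

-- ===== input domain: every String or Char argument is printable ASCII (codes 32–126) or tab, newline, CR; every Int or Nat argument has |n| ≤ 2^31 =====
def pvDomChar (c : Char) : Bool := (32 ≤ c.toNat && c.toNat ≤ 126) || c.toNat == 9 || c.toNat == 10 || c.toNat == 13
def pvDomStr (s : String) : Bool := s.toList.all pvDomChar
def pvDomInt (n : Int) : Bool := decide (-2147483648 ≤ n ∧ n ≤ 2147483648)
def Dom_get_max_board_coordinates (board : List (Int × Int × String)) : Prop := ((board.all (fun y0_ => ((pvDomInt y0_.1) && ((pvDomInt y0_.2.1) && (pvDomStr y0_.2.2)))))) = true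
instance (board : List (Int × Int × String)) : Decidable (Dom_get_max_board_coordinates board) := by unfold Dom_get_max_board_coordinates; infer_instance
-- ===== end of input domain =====

-- B merges A's validation loop and two max-generator passes into one running-max pass (objective: simpler).
-- ===== PORT A =====
-- Under the type convention every key is a pair of ints, so A's per-key validation KeyError never
-- fires; the loop just collects the keys. The empty board (KeyError "board must have tuple keys")
-- is excluded by Pre_.
def get_max_board_coordinates (board : List (Int × Int × String)) : Int × Int :=
  let tuple_keys : List (Int × Int) :=
    board.foldl (fun acc kv => acc ++ [(kv.1, kv.2.1)]) []
  let max_x_coordinate := (PySem.List.max? (tuple_keys.map (fun k => k.1)) (fun v => v)).getD 0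
  let max_y_coordinate := (PySem.List.max? (tuple_keys.map (fun k => k.2)) (fun v => v)).getD 0
  (max_x_coordinate, max_y_coordinate)

-- ===== PORT B =====
-- single pass; the `None` initial state becomes the match on the first key, the per-key
-- `if key[i] > max_i` updates become the fold step. [] (where Source B raises) is outside Pre_.
def get_max_board_coordinates_alt (board : List (Int × Int × String)) : Int × Int :=
  match board with
  | [] => (0, 0)
  | (x, y, _) :: rest =>
      rest.foldl (fun m kv =>
        ((if kv.1 > m.1 then kv.1 else m.1), (if kv.2.1 > m.2 then kv.2.1 else m.2))) (x, y)

-- ===== PRECONDITION & SPEC =====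
-- A (and B) raise KeyError "board must have tuple keys" on the empty board; excluded.
def Pre_get_max_board_coordinates (board : List (Int × Int × String)) : Prop := board ≠ []
instance (board : List (Int × Int × String)) : Decidable (Pre_get_max_board_coordinates board) := by
  unfold Pre_get_max_board_coordinates; infer_instance

def pvWitness_get_max_board_coordinates : (List (Int × Int × String)) := [(3, 0, "a"), (1, 2, "b")]

def Spec_get_max_board_coordinates (board : List (Int × Int × String)) (out : Int × Int) : Prop := out = get_max_board_coordinates_alt board
instance (board : List (Int × Int × String)) (out : Int × Int) : Decidable (Spec_get_max_board_coordinates board out) := by unfold Spec_get_max_board_coordinates; infer_instance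

-- ===== CLAIM (what is proved, stated in full; the proofs are below) =====
def Claim_equal_get_max_board_coordinates : Prop := ∀ (board : List (Int × Int × String)), Dom_get_max_board_coordinates board → Pre_get_max_board_coordinates board → Spec_get_max_board_coordinates board (get_max_board_coordinates board)

-- ===== LEMMAS AND PROOFS =====
theorem if_gt_eq_max (a b : Int) : (if b > a then b else a) = max a b := by
  split <;> omega

theorem foldl_pair_max (rest : List (Int × Int × String)) :
    ∀ (x y : Int),
      rest.foldl (fun m kv =>
        ((if kv.1 > m.1 then kv.1 else m.1), (if kv.2.1 > m.2 then kv.2.1 else m.2))) (x, y)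
      = ((rest.map (fun kv => kv.1)).foldl max x, (rest.map (fun kv => kv.2.1)).foldl max y) := by
  induction rest with
  | nil => intro x y; simp
  | cons hd tl ih =>
    intro x y
    rw [List.foldl_cons, ih]
    simp [if_gt_eq_max]

theorem foldl_append_keys (board : List (Int × Int × String)) :
    ∀ (acc : List (Int × Int)),
      board.foldl (fun acc kv => acc ++ [(kv.1, kv.2.1)]) acc
      = acc ++ board.map (fun kv => (kv.1, kv.2.1)) := by
  induction board with
  | nil => intro acc; simp
  | cons hd tl ih => intro acc; simp [List.foldl_cons, ih]

-- ===== VERDICT (by name: the statement is the Claim_ definition above) =====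
theorem get_max_board_coordinates_spec : Claim_equal_get_max_board_coordinates := by
  intro board _ hpre
  unfold Spec_get_max_board_coordinates get_max_board_coordinates get_max_board_coordinates_alt
  match board with
  | [] => exact absurd rfl hpre
  | (x, y, s) :: rest =>
    simp only [foldl_append_keys, List.nil_append, List.map_cons, List.map_map,
      Function.comp_def, PySem.List.max?_id_cons, Option.getD_some, foldl_pair_max]
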